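-- pv_equiv track=rewrite | github.com/N-Linh/simple-apriori-implementation | apriori algorithm/apriori.py | createFk
-- ===== SOURCE A (Python) =====
-- def createFk(dataSet, Ck, minsup):
--     Fk_countSup = {}
--
--     for k in Ck:
--         count = 0
--         for data in dataSet:
--             if set(k).issubset(set(data)):
--                 count += 1
--         Fk_countSup[tuple(k)] = count
--
--     Fk = []
--     for itemSet in Fk_countSup.keys():
--         if (Fk_countSup[itemSet] >= minsup):
--             Fk.append(itemSet)
--     return Fk
-- ===== SOURCE B (Python) =====
-- def createFk(dataSet, Ck, minsup):
--     # Vertical (inverted) index, built in one pass: item -> set of transaction indices containing it.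
--     index = {}
--     for i, data in enumerate(dataSet):
--         for item in set(data):
--             index.setdefault(item, set()).add(i)
--
--     sup = {}
--     for k in Ck:
--         tids = set(range(len(dataSet)))
--         for item in k:
--             tids &= index.get(item, set())
--         sup[tuple(k)] = len(tids)
--
--     return [itemSet for itemSet, c in sup.items() if c >= minsup]
-- ===== Notes on version B (the rewrite author's own statement) =====
-- stated objective: faster
-- what changed: B builds a vertical (inverted) index item -> set of transaction indices in one pass and computes each candidate's support as the size of the intersection of its items' tid-sets, instead of A's subset test against every transaction for every candidate; the result list is the support dict's items filtered by minsup.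
import Mathlib
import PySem

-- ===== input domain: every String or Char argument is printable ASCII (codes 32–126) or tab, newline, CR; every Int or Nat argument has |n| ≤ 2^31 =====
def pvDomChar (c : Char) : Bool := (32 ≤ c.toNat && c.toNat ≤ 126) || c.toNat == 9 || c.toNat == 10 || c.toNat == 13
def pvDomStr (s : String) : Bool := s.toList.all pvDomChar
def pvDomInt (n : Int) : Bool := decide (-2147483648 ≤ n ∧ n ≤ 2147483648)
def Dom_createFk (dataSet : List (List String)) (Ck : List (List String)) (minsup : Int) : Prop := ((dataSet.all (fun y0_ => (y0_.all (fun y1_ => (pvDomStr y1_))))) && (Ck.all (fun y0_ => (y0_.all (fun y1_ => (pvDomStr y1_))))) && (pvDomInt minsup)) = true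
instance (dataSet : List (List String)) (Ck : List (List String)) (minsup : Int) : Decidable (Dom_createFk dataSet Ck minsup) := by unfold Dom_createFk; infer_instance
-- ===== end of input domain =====

-- B replaces A's per-candidate subset scan over all transactions by a vertical (inverted) index
-- item → transaction-id set built once, intersecting tid-sets per candidate (objective: faster, measured).

-- ===== PORT A =====
def createFk (dataSet : List (List String)) (Ck : List (List String)) (minsup : Int) : List (List String) :=
  let fkCountSup : PySem.Dict (List String) Int :=
    Ck.foldl (fun d k =>
      d.insert k (dataSet.foldl (fun count data =>
        if PySem.Set.issubset (PySem.Set.ofList k) (PySem.Set.ofList data) then count + 1 else count)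
        (0 : Int))) PySem.Dict.empty
  -- 'Fk_countSup[itemSet]' is ported as getD: itemSet ranges over the dict's own keys, so no KeyError
  fkCountSup.keys.foldl (fun fk itemSet =>
    if fkCountSup.getD itemSet 0 ≥ minsup then fk ++ [itemSet] else fk) []

-- ===== PORT B =====
def createFk_alt (dataSet : List (List String)) (Ck : List (List String)) (minsup : Int) : List (List String) :=
  -- one-pass inverted index: item -> set of transaction indices containing it
  -- ('index.setdefault(item, set()).add(i)' is Dict.modify with default [] and Set.add)
  let index : PySem.Dict String (PySem.Set Int) :=
    (PySem.List.enumerate dataSet).foldl (fun d p =>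
      (PySem.Set.ofList p.2).foldl (fun d item =>
        d.modify item [] (fun tl => PySem.Set.add tl p.1)) d) PySem.Dict.empty
  let sup : PySem.Dict (List String) Int :=
    Ck.foldl (fun d k =>
      d.insert k ((k.foldl (fun tids item =>
        PySem.Set.inter tids (index.getD item []))
        (PySem.Set.ofList (PySem.List.pyRange 0 (dataSet.length:Int) 1))).length : Int))
      PySem.Dict.empty
  (sup.items.filter (fun p => p.2 ≥ minsup)).map (fun p => p.1)

-- ===== PRECONDITION & SPEC =====
def Spec_createFk (dataSet : List (List String)) (Ck : List (List String)) (minsup : Int) (out : List (List String)) : Prop := out = createFk_alt dataSet Ck minsup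
instance (dataSet : List (List String)) (Ck : List (List String)) (minsup : Int) (out : List (List String)) : Decidable (Spec_createFk dataSet Ck minsup out) := by unfold Spec_createFk; infer_instance

-- ===== CLAIM (what is proved, stated in full; the proofs are below) =====
def Claim_equal_createFk : Prop := ∀ (dataSet : List (List String)) (Ck : List (List String)) (minsup : Int), Dom_createFk dataSet Ck minsup → Spec_createFk dataSet Ck minsup (createFk dataSet Ck minsup)


-- ===== LEMMAS AND PROOFS =====

theorem enumerate_append_singleton (xs : List (List String)) (x : List String) (s : Int) :
    PySem.List.enumerate (xs ++ [x]) s = PySem.List.enumerate xs s ++ [(s + xs.length, x)] := by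
  induction xs generalizing s with
  | nil => simp [PySem.List.enumerate]
  | cons a xs ih => simp [PySem.List.enumerate, ih]; ring_nf

theorem pyGetD_append_left (xs ys : List (List String)) (d : List String) (i : Int)
    (h1 : 0 ≤ i) (h2 : i < (xs.length : Int)) :
    PySem.List.pyGetD (xs ++ ys) i d = PySem.List.pyGetD xs i d := by
  rw [PySem.List.pyGetD_eq_getElem (xs ++ ys) d h1 (by simp; omega),
    PySem.List.pyGetD_eq_getElem xs d h1 h2]
  rw [List.getElem_append_left]

-- one transaction's inner loop: every item of s gets i added to its tid-set, other keys unchanged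
theorem inner_getD (s : List String) (i : Int) (d : PySem.Dict String (PySem.Set Int)) (item : String) :
    (s.foldl (fun d it => d.modify it [] (fun tl => PySem.Set.add tl i)) d).getD item []
    = if item ∈ s then PySem.Set.add (d.getD item []) i else d.getD item [] := by
  induction s generalizing d with
  | nil => simp
  | cons a s ih =>
    simp only [List.foldl_cons]
    rw [ih, PySem.Dict.getD_modify]
    by_cases hs : item ∈ s <;> by_cases ha : item = a <;>
      simp [hs, ha]

-- the inverted index looks up, for any item, exactly the list of transaction indices containing it
theorem idx_getD (dataSet : List (List String)) (item : String) :
    (((PySem.List.enumerate dataSet).foldl (fun d p =>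
      (PySem.Set.ofList p.2).foldl (fun d it =>
        d.modify it [] (fun tl => PySem.Set.add tl p.1)) d) PySem.Dict.empty).getD item [])
    = (PySem.List.pyRange 0 (dataSet.length:Int) 1).filter
        (fun i => (PySem.List.pyGetD dataSet i []).contains item) := by
  induction dataSet using List.reverseRecOn with
  | nil => simp [PySem.List.enumerate, PySem.List.pyRange]
  | append_singleton ds x ih =>
    rw [enumerate_append_singleton, List.foldl_append]
    simp only [List.foldl_cons, List.foldl_nil]
    rw [inner_getD, ih]
    have hsplit : PySem.List.pyRange 0 (((ds ++ [x]).length : Nat) : Int) 1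
        = PySem.List.pyRange 0 (ds.length : Int) 1 ++ [(ds.length : Int)] := by
      have := PySem.List.pyRange_one_succ_right (a := 0) (b := (ds.length : Int)) (by omega)
      simp only [List.length_append, List.length_cons, List.length_nil]
      push_cast
      exact this
    rw [hsplit, List.filter_append]
    have hleft : (PySem.List.pyRange 0 (ds.length : Int) 1).filter
        (fun i => (PySem.List.pyGetD (ds ++ [x]) i []).contains item)
        = (PySem.List.pyRange 0 (ds.length : Int) 1).filter
          (fun i => (PySem.List.pyGetD ds i []).contains item) := by
      refine List.filter_congr ?_
      intro i hi
      have hb := (PySem.List.mem_pyRange_one).mp hi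
      rw [pyGetD_append_left ds [x] [] i (by omega) (by omega)]
    rw [hleft]
    by_cases hx : item ∈ PySem.Set.ofList x
    · have hxx : item ∈ x := (PySem.Set.mem_ofList _ _).mp hx
      have hnotin : ((ds.length : Int)) ∉ (PySem.List.pyRange 0 (ds.length : Int) 1).filter
          (fun i => (PySem.List.pyGetD ds i []).contains item) := by
        intro hmem
        have := (PySem.List.mem_pyRange_one).mp (List.mem_filter.mp hmem).1
        omega
      simp only [hx, if_true, zero_add]
      rw [PySem.Set.add_of_not_mem hnotin]
      simp [hxx]
    · have hxx : item ∉ x := fun h => hx ((PySem.Set.mem_ofList _ _).mpr h)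
      simp only [hx, if_false]
      simp [hxx]

-- intersecting the tid-lists of the items of k filters the transaction-index range by "k is contained"
theorem inter_fold (dataSet : List (List String)) (k : List String) (P : Int → Bool) :
    k.foldl (fun tids item =>
        tids.filter (fun i =>
          ((PySem.List.pyRange 0 (dataSet.length:Int) 1).filter
            (fun j => (PySem.List.pyGetD dataSet j []).contains item)).contains i))
      ((PySem.List.pyRange 0 (dataSet.length:Int) 1).filter P)
    = (PySem.List.pyRange 0 (dataSet.length:Int) 1).filter
        (fun i => P i && k.all (fun item => (PySem.List.pyGetD dataSet i []).contains item)) := by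
  induction k generalizing P with
  | nil => simp
  | cons item k ih =>
    simp only [List.foldl_cons, List.filter_filter]
    have hstep : ((PySem.List.pyRange 0 (dataSet.length:Int) 1).filter
        (fun i => ((PySem.List.pyRange 0 (dataSet.length:Int) 1).filter
            (fun j => (PySem.List.pyGetD dataSet j []).contains item)).contains i && P i))
        = (PySem.List.pyRange 0 (dataSet.length:Int) 1).filter
            (fun i => P i && (PySem.List.pyGetD dataSet i []).contains item) := by
      refine List.filter_congr ?_
      intro i hi
      simp [List.contains_eq_mem, List.mem_filter, hi, Bool.and_comm]
    rw [hstep, ih]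
    refine List.filter_congr ?_
    intro i _
    simp [List.all_cons, Bool.and_assoc]

theorem createFk_main : ∀ (dataSet : List (List String)) (Ck : List (List String)) (minsup : Int),
    createFk dataSet Ck minsup = createFk_alt dataSet Ck minsup := by
  intro dataSet Ck minsup
  simp only [createFk, createFk_alt]
  -- the two support values coincide for every candidate k
  have hsup : ∀ kk : List String,
      ((kk.foldl (fun tids item =>
        PySem.Set.inter tids (((PySem.List.enumerate dataSet).foldl (fun d p =>
          (PySem.Set.ofList p.2).foldl (fun d it =>
            d.modify it [] (fun tl => PySem.Set.add tl p.1)) d) PySem.Dict.empty).getD item []))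
        (PySem.Set.ofList (PySem.List.pyRange 0 (dataSet.length:Int) 1))).length : Int)
      = dataSet.foldl (fun count data =>
          if PySem.Set.issubset (PySem.Set.ofList kk) (PySem.Set.ofList data) then count + 1 else count)
          (0 : Int) := by
    intro kk
    have hbody : (fun (tids : List Int) (item : String) =>
        PySem.Set.inter tids (((PySem.List.enumerate dataSet).foldl (fun d p =>
          (PySem.Set.ofList p.2).foldl (fun d it =>
            d.modify it [] (fun tl => PySem.Set.add tl p.1)) d) PySem.Dict.empty).getD item []))
        = (fun tids item =>
          tids.filter (fun i =>
            ((PySem.List.pyRange 0 (dataSet.length:Int) 1).filter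
              (fun j => (PySem.List.pyGetD dataSet j []).contains item)).contains i)) := by
      funext tids item
      rw [idx_getD]
      rfl
    have hinit : PySem.Set.ofList (PySem.List.pyRange 0 (dataSet.length:Int) 1)
        = (PySem.List.pyRange 0 (dataSet.length:Int) 1).filter (fun _ => true) := by
      rw [PySem.Set.ofList_eq_self_of_nodup _ (PySem.List.nodup_pyRange_one 0 (dataSet.length : Int))]
      exact (List.filter_true _).symm
    rw [hbody, hinit]
    have h0 := inter_fold dataSet kk (fun _ => true)
    simp only [Bool.true_and] at h0
    rw [h0, PySem.List.foldl_count_if, ← List.countP_eq_length_filter]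
    have hmap := congrArg (List.countP (fun data => kk.all (fun item => data.contains item)))
      (PySem.List.map_pyGetD_pyRange_zero' dataSet [])
    rw [List.countP_map] at hmap
    rw [show (fun i => kk.all fun item => (PySem.List.pyGetD dataSet i []).contains item)
        = ((fun data => kk.all (fun item => data.contains item)) ∘ (fun j => PySem.List.pyGetD dataSet j [])) from rfl,
      hmap]
    have hpred : ∀ data : List String,
        PySem.Set.issubset (PySem.Set.ofList kk) (PySem.Set.ofList data)
        = kk.all (fun item => data.contains item) := by
      intro data
      rw [Bool.eq_iff_iff]
      simp [PySem.Set.issubset_iff, PySem.Set.mem_ofList, List.all_eq_true, List.contains_eq_mem]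
    simp only [hpred]
    omega
  -- hence the two support dicts are equal
  have hdict : (Ck.foldl (fun d kk =>
      d.insert kk ((kk.foldl (fun tids item =>
        PySem.Set.inter tids (((PySem.List.enumerate dataSet).foldl (fun d p =>
          (PySem.Set.ofList p.2).foldl (fun d it =>
            d.modify it [] (fun tl => PySem.Set.add tl p.1)) d) PySem.Dict.empty).getD item []))
        (PySem.Set.ofList (PySem.List.pyRange 0 (dataSet.length:Int) 1))).length : Int)) PySem.Dict.empty)
      = (Ck.foldl (fun d kk =>
        d.insert kk (dataSet.foldl (fun count data =>
          if PySem.Set.issubset (PySem.Set.ofList kk) (PySem.Set.ofList data) then count + 1 else count)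
          (0 : Int))) PySem.Dict.empty) := by
    congr 1
    funext d kk
    rw [hsup]
  rw [hdict]
  -- final phase: keys-loop with lookup = filter of items by value
  set d := (Ck.foldl (fun d kk =>
      d.insert kk (dataSet.foldl (fun count data =>
        if PySem.Set.issubset (PySem.Set.ofList kk) (PySem.Set.ofList data) then count + 1 else count)
        (0 : Int))) PySem.Dict.empty) with hd
  have hnd : d.keys.Nodup := by
    rw [hd]
    exact PySem.Dict.nodup_keys_foldl_insert Ck _ PySem.Dict.empty PySem.Dict.nodup_keys_empty
  rw [PySem.Dict.items_eq_map_keys d hnd 0, List.filter_map, List.map_map]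
  have hite : (fun (fk : List (List String)) ks => if d.getD ks 0 ≥ minsup then fk ++ [ks] else fk)
      = (fun fk ks => if decide (d.getD ks 0 ≥ minsup) = true then fk ++ [ks] else fk) := by
    funext fk ks
    by_cases h : d.getD ks 0 ≥ minsup <;> simp [h]
  rw [hite, PySem.List.foldl_append_if_eq_filter]
  simp only [List.nil_append, Function.comp_def]
  exact (List.map_id _).symm

-- ===== VERDICT (by name: the statement is the Claim_ definition above) =====
theorem createFk_spec : Claim_equal_createFk := by
  intro dataSet Ck minsup _
  exact createFk_main dataSet Ck minsup
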